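-- pv_equiv track=rewrite | github.com/aturrisi-2/genesi | core/curiosity_engine.py | _pick_best_keyword
-- ===== SOURCE A (Python) =====
-- from typing import Dict, Any, List, Optional, Tuple
--
-- def _pick_best_keyword(keywords: List[str], msg: str) -> str:
--     """
--     Seleziona la keyword più significativa.
--     Preferisce parole emotive e identitarie.
--     """
--     # Emotional priority words
--     emotional_words = {
--         "vuoto", "vuota", "perso", "persa", "solo", "sola",
--         "paura", "ansia", "rabbia", "tristezza", "dolore",
--         "confuso", "confusa", "stanco", "stanca", "bloccato", "bloccata",
--         "inadeguato", "inadeguata", "sbagliato", "sbagliata",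
--         "depresso", "depressa", "angoscia", "terrore", "vergogna",
--         "colpa", "frustrazione", "solitudine", "mancanza", "nostalgia",
--         "intrappolato", "intrappolata", "sospeso", "sospesa",
--         "fallimento", "speranza", "direzione", "identita'",
--         "cambiamento", "perdita", "separazione", "abbandono",
--     }
--
--     # Check for emotional keywords first
--     for kw in keywords:
--         if kw in emotional_words:
--             return kw
--
--     # Then pick longest keyword (usually more specific)
--     if keywords:
--         return max(keywords, key=len)
--
--     return "questo"
-- ===== SOURCE B (Python) =====
-- def _pick_best_keyword(keywords, msg):
--     """Order-theoretic formulation: give every keyword a priority rank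
--     (0,0) if emotional, (1,-len) otherwise, and take the minimum-rank
--     keyword (min keeps the first minimum); 'questo' on an empty list."""
--     emotional_words = {
--         "vuoto", "vuota", "perso", "persa", "solo", "sola",
--         "paura", "ansia", "rabbia", "tristezza", "dolore",
--         "confuso", "confusa", "stanco", "stanca", "bloccato", "bloccata",
--         "inadeguato", "inadeguata", "sbagliato", "sbagliata",
--         "depresso", "depressa", "angoscia", "terrore", "vergogna",
--         "colpa", "frustrazione", "solitudine", "mancanza", "nostalgia",
--         "intrappolato", "intrappolata", "sospeso", "sospesa",
--         "fallimento", "speranza", "direzione", "identita'",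
--         "cambiamento", "perdita", "separazione", "abbandono",
--     }
--
--     def rank(kw):
--         return (0, 0) if kw in emotional_words else (1, -len(kw))
--
--     if not keywords:
--         return "questo"
--     return min(keywords, key=rank)
-- ===== Notes on version B (the rewrite author's own statement) =====
-- stated objective: alternative
-- what changed: Replaces A's staged control flow (emotional scan with early return, then max(keywords, key=len)) by an order-theoretic formulation: each keyword gets a priority key (0,0) if emotional else (1,-len), and the result is min(keywords, key=rank), whose lexicographic first-minimum semantics encodes both preferences at once.
import Mathlib
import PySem

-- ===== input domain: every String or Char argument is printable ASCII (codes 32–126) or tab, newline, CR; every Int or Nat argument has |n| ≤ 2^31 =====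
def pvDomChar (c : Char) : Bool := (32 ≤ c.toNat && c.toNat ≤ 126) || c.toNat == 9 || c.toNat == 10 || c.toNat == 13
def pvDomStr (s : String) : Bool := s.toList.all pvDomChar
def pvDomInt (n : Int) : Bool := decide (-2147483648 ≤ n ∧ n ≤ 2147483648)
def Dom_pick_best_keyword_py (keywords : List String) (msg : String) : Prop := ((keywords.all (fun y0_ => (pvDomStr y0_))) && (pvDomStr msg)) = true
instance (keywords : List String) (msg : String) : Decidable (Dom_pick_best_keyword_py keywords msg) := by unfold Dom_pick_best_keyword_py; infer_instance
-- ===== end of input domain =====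

-- B replaces A's staged control flow (emotional scan with early return, then a max-by-length
-- pass) by a single ranking function (0,0)/(1,-len) and min-by-rank (objective: alternative).

-- ===== PORT A =====
-- the literal set of emotional words (a Python set of distinct string literals)
def pvEmotionalWords : List String :=
  ["vuoto", "vuota", "perso", "persa", "solo", "sola",
   "paura", "ansia", "rabbia", "tristezza", "dolore",
   "confuso", "confusa", "stanco", "stanca", "bloccato", "bloccata",
   "inadeguato", "inadeguata", "sbagliato", "sbagliata",
   "depresso", "depressa", "angoscia", "terrore", "vergogna",
   "colpa", "frustrazione", "solitudine", "mancanza", "nostalgia",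
   "intrappolato", "intrappolata", "sospeso", "sospesa",
   "fallimento", "speranza", "direzione", "identita'",
   "cambiamento", "perdita", "separazione", "abbandono"]

-- A's first loop: 'for kw in keywords: if kw in emotional_words: return kw'
def pvFindEmotional : List String → Option String
  | [] => none
  | kw :: rest => if kw ∈ pvEmotionalWords then some kw else pvFindEmotional rest

def pick_best_keyword_py (keywords : List String) (msg : String) : String :=
  match pvFindEmotional keywords with
  | some kw => kw
  | none =>
    -- 'if keywords: return max(keywords, key=len)'; max? = none exactly when the list is empty
    match PySem.List.max? keywords PySem.Str.len with
    | some m => m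
    | none => "questo"

-- ===== PORT B =====
-- Source B's rank key: (0, 0) for an emotional keyword, (1, -len) otherwise
def pvRank1 (kw : String) : Int := if kw ∈ pvEmotionalWords then 0 else 1
def pvRank2 (kw : String) : Int := if kw ∈ pvEmotionalWords then 0 else -(PySem.Str.len kw)

def pick_best_keyword_py_alt (keywords : List String) (msg : String) : String :=
  -- 'if not keywords: return "questo"; return min(keywords, key=rank)'
  match PySem.List.min2? keywords pvRank1 pvRank2 with
  | some m => m
  | none => "questo"

-- ===== PRECONDITION & SPEC =====
def Spec_pick_best_keyword_py (keywords : List String) (msg : String) (out : String) : Prop := out = pick_best_keyword_py_alt keywords msg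
instance (keywords : List String) (msg : String) (out : String) : Decidable (Spec_pick_best_keyword_py keywords msg out) := by unfold Spec_pick_best_keyword_py; infer_instance

-- ===== CLAIM (what is proved, stated in full; the proofs are below) =====
def Claim_equal_pick_best_keyword_py : Prop := ∀ (keywords : List String) (msg : String), Dom_pick_best_keyword_py keywords msg → Spec_pick_best_keyword_py keywords msg (pick_best_keyword_py keywords msg)

-- ===== LEMMAS AND PROOFS =====

-- the update step min2? folds with, specialised to the rank keys
def pvMinStep (acc : Option String) (x : String) : Option String :=
  match acc with
  | none => some x
  | some m =>
    if (decide (pvRank1 x < pvRank1 m) || !decide (pvRank1 m < pvRank1 x) && decide (pvRank2 x < pvRank2 m)) = true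
    then some x else some m

theorem min2?_eq_foldl_step (l : List String) :
    PySem.List.min2? l pvRank1 pvRank2 = l.foldl pvMinStep none := by
  unfold PySem.List.min2?
  congr 1
  funext acc x
  cases acc <;> rfl

-- the update step of Python's max(·, key=len)
def pvUpd (acc : Option String) (x : String) : Option String :=
  match acc with
  | none => some x
  | some m => if PySem.Str.len m < PySem.Str.len x then some x else some m

theorem max?_eq_foldl_upd (l : List String) :
    PySem.List.max? l PySem.Str.len = l.foldl pvUpd none := by
  unfold PySem.List.max?
  congr 1
  funext acc x
  cases acc <;> rfl

-- the running-max loop without the option wrapper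
def pvMaxFrom (b : String) : List String → String
  | [] => b
  | x :: rest => pvMaxFrom (if PySem.Str.len b < PySem.Str.len x then x else b) rest

theorem foldl_upd_some (l : List String) : ∀ b : String,
    l.foldl pvUpd (some b) = some (pvMaxFrom b l) := by
  induction l with
  | nil => intro b; rfl
  | cons x rest ih =>
    intro b
    simp only [List.foldl_cons, pvUpd, pvMaxFrom]
    split <;> exact ih _

-- once the accumulator is an emotional word, the min-fold never moves off it
theorem foldl_step_emotional (l : List String) : ∀ b : String, b ∈ pvEmotionalWords →
    l.foldl pvMinStep (some b) = some b := by
  induction l with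
  | nil => intro b _; rfl
  | cons x rest ih =>
    intro b hb
    have h : pvMinStep (some b) x = some b := by
      by_cases hx : x ∈ pvEmotionalWords <;>
        simp [pvMinStep, pvRank1, pvRank2, hb, hx]
    simp only [List.foldl_cons, h]
    exact ih b hb

-- with a non-emotional accumulator the min-fold computes: first emotional word, else running max
theorem foldl_step_plain (l : List String) : ∀ b : String, b ∉ pvEmotionalWords →
    l.foldl pvMinStep (some b) =
      some (match pvFindEmotional l with
            | some kw => kw
            | none => pvMaxFrom b l) := by
  induction l with
  | nil => intro b _; rfl
  | cons x rest ih =>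
    intro b hb
    by_cases hx : x ∈ pvEmotionalWords
    · have h : pvMinStep (some b) x = some x := by
        simp [pvMinStep, pvRank1, pvRank2, hb, hx]
      simp only [List.foldl_cons, h, pvFindEmotional, hx, if_true]
      exact foldl_step_emotional rest x hx
    · by_cases hlen : PySem.Str.len b < PySem.Str.len x
      · have hl : b.toList.length < x.toList.length := by
          have h' := hlen; simp [PySem.Str.len] at h'; simpa using h'
        have h : pvMinStep (some b) x = some x := by
          simp [pvMinStep, pvRank1, pvRank2, hb, hx]
          intro hle
          exact absurd hle (by simp only [String.length_toList] at hl ⊢; omega)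
        simp only [List.foldl_cons, h, pvFindEmotional, hx, if_false, pvMaxFrom, if_pos hlen]
        exact ih x hx
      · have hl : ¬ b.toList.length < x.toList.length := by
          intro h'; apply hlen; simp only [PySem.Str.len]; exact_mod_cast h'
        have h : pvMinStep (some b) x = some b := by
          simp [pvMinStep, pvRank1, pvRank2, hb, hx]
          intro hlt
          exact absurd hlt (by simp only [String.length_toList] at hl ⊢; omega)
        simp only [List.foldl_cons, h, pvFindEmotional, hx, if_false, pvMaxFrom, if_neg hlen]
        exact ih b hb

-- ===== VERDICT (by name: the statement is the Claim_ definition above) =====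
theorem pick_best_keyword_py_spec : Claim_equal_pick_best_keyword_py := by
  intro keywords msg _
  unfold Spec_pick_best_keyword_py pick_best_keyword_py pick_best_keyword_py_alt
  cases keywords with
  | nil => rfl
  | cons k rest =>
    rw [min2?_eq_foldl_step, max?_eq_foldl_upd]
    simp only [List.foldl_cons]
    by_cases hk : k ∈ pvEmotionalWords
    · have h1 : pvMinStep none k = some k := rfl
      rw [h1, foldl_step_emotional rest k hk]
      simp [pvFindEmotional, hk]
    · have h1 : pvMinStep none k = some k := rfl
      have h2 : pvUpd none k = some k := rfl
      rw [h1, h2, foldl_step_plain rest k hk, foldl_upd_some rest k]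
      simp only [pvFindEmotional, hk, if_false]
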